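-- pv_equiv track=rewrite | github.com/jJup0/LeetCode | Hard/2818. Apply Operations to Maximize Score.py | _get_prime_scores
-- ===== SOURCE A (Python) =====
-- def _get_prime_scores(nums: list[int], primes: list[int]):
--     """Calculate the prime score for each number in nums.
--
--     Complexity:
--         Time: O(n^1.5 / log(n))
--         Space: O(n)
--     """
--     primes_set = frozenset(primes)
--     prime_scores: list[int] = []
--     for num in nums:
--         score = 0
--         for prime in primes:
--             if prime * prime > num:
--                 break
--             if num % prime == 0:
--                 score += 1
--                 while num % prime == 0:
--                     num //= prime
--         if num in primes_set:
--             score += 1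
--         prime_scores.append(score)
--     return prime_scores
-- ===== SOURCE B (Python) =====
-- def _get_prime_scores(nums: list[int], primes: list[int]):
--     """Prime score per number, computed prime-major: one pass per prime over the
--     still-active numbers, retiring a number as soon as prime*prime exceeds it."""
--     prime_set = set(primes)
--     pending = [(num, j, 0) for j, num in enumerate(nums)]  # (current value, index, score)
--     done = {}
--     for p in primes:
--         if not pending:
--             break
--         pp = p * p
--         nxt = []
--         for c, j, s in pending:
--             if pp > c:
--                 done[j] = s + (1 if c in prime_set else 0)
--             else:
--                 if c % p == 0:
--                     s += 1
--                     while c % p == 0: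
--                         c //= p
--                 nxt.append((c, j, s))
--         pending = nxt
--     for c, j, s in pending:
--         done[j] = s + (1 if c in prime_set else 0)
--     return [done[j] for j in range(len(nums))]
-- ===== Notes on version B (the rewrite author's own statement) =====
-- stated objective: alternative
-- what changed: Loop order inverted: B makes one pass per prime over a shrinking list of still-active (value, index, score) records, retiring a number into a result dict as soon as prime*prime exceeds its reduced value and stopping early once no record is active, instead of A's number-major rescan of the primes list for every number.
-- outside the precondition, e.g. on _get_prime_scores([8], [-2, 1]): A returns [1], B returns [1]; on _get_prime_scores([4], [0]): A raises ZeroDivisionError, B raises ZeroDivisionError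
import Mathlib
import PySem

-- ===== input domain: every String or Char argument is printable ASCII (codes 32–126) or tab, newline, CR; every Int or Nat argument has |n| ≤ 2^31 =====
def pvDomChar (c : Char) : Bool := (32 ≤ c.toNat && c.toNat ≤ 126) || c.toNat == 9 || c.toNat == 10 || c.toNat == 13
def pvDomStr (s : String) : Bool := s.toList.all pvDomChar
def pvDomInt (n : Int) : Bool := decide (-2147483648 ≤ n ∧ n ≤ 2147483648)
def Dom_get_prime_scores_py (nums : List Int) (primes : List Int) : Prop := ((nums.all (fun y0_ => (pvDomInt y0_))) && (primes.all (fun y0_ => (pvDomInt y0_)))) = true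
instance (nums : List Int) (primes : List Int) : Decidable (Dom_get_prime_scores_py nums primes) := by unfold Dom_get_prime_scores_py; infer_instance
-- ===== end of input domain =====

-- B inverts the loop order: one pass per prime over a shrinking list of still-active
-- (value, index, score) records instead of A's number-major rescan of the primes list
-- (objective: alternative traversal, same asymptotic cost).

-- ===== PORT A =====
-- shared transliteration of the identical inner loop 'while num % p == 0: num //= p' of
-- both Pythons; fuel |num| suffices under Pre_ (|p| ≥ 2 halves |num| at every division)
def pvWhileDiv : Nat → Int → Int → Int
  | 0, num, _ => num
  | f + 1, num, p =>
    if PySem.Int.mod num p = 0 then pvWhileDiv f (PySem.Int.floordiv num p) p else num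

-- the inner 'for prime in primes: … break …' of A, returning (reduced num, score)
def pvALoop : List Int → Int → Int → Int × Int
  | [], num, score => (num, score)
  | p :: ps, num, score =>
    if p * p > num then (num, score)
    else if PySem.Int.mod num p = 0 then
      pvALoop ps (pvWhileDiv num.natAbs num p) (score + 1)
    else pvALoop ps num score

def get_prime_scores_py (nums : List Int) (primes : List Int) : List Int :=
  let primesSet : PySem.Set Int := PySem.Set.ofList primes
  nums.foldl (fun acc num =>
    let r := pvALoop primes num 0
    acc ++ [r.2 + (if primesSet.contains r.1 then 1 else 0)]) []

-- ===== PORT B =====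
-- one pass of one prime over the pending records; state = (nxt, done)
def pvBPass (pset : PySem.Set Int) (p : Int)
    (pending : List (Int × Int × Int)) (done : PySem.Dict Int Int) :
    List (Int × Int × Int) × PySem.Dict Int Int :=
  pending.foldl (fun st r =>
    if p * p > r.1 then
      (st.1, st.2.insert r.2.1 (r.2.2 + (if pset.contains r.1 then 1 else 0)))
    else if PySem.Int.mod r.1 p = 0 then
      (st.1 ++ [(pvWhileDiv r.1.natAbs r.1 p, r.2.1, r.2.2 + 1)], st.2)
    else
      (st.1 ++ [r], st.2)) ([], done)

-- 'for p in primes: if not pending: break; …'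
def pvBMain (pset : PySem.Set Int) :
    List Int → List (Int × Int × Int) → PySem.Dict Int Int →
    List (Int × Int × Int) × PySem.Dict Int Int
  | [], pending, done => (pending, done)
  | p :: ps, pending, done =>
    if pending.isEmpty then (pending, done)
    else
      let st := pvBPass pset p pending done
      pvBMain pset ps st.1 st.2

def get_prime_scores_py_alt (nums : List Int) (primes : List Int) : List Int :=
  let pset : PySem.Set Int := PySem.Set.ofList primes
  let pending0 := nums.zipIdx.map (fun q => (q.1, (q.2 : Int), (0 : Int)))
  let st := pvBMain pset primes pending0 PySem.Dict.empty
  let done2 := st.1.foldl (fun d r =>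
    d.insert r.2.1 (r.2.2 + (if pset.contains r.1 then 1 else 0))) st.2
  -- 'done[j]': the key is always present (proved below); getD is the total form
  (PySem.List.pyRange 0 (PySem.List.len nums) 1).map (fun j => done2.getD j 0)

-- ===== PRECONDITION & SPEC =====
-- Pre_ excludes exactly the inputs that can run into a 0, 1 or -1 entry of primes: on
-- those A raises ZeroDivisionError (0) or loops forever (+-1). A bad entry at position i
-- is only dangerous for a number num >= 0 that no earlier prime breaks on
-- (num < primes[k]^2 for some k < i stops the scan before i; num < 0 breaks at once);
-- this is a closed-form over-approximation, so a few inputs where the scan happens to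
-- break early for other reasons are also dropped (B returns the same value there).
def Pre_get_prime_scores_py (nums : List Int) (primes : List Int) : Prop :=
  ∀ num ∈ nums, 0 ≤ num →
    ∀ i : Fin primes.length, (primes[i] = 0 ∨ primes[i] = 1 ∨ primes[i] = -1) →
      ∃ k : Fin primes.length, k.1 < i.1 ∧ num < primes[k] * primes[k]
instance (nums : List Int) (primes : List Int) : Decidable (Pre_get_prime_scores_py nums primes) := by
  unfold Pre_get_prime_scores_py; infer_instance

def pvWitness_get_prime_scores_py : List Int × List Int := ([12, 7, 0, -5, 100], [2, 3, 5, 7])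

def Spec_get_prime_scores_py (nums : List Int) (primes : List Int) (out : List Int) : Prop := out = get_prime_scores_py_alt nums primes
instance (nums : List Int) (primes : List Int) (out : List Int) : Decidable (Spec_get_prime_scores_py nums primes out) := by unfold Spec_get_prime_scores_py; infer_instance

-- ===== CLAIM (what is proved, stated in full; the proofs are below) =====
def Claim_equal_get_prime_scores_py : Prop := ∀ (nums : List Int) (primes : List Int), Dom_get_prime_scores_py nums primes → Pre_get_prime_scores_py nums primes → Spec_get_prime_scores_py nums primes (get_prime_scores_py nums primes)

-- ===== LEMMAS AND PROOFS =====

-- A's value for one number: run the inner loop, then the membership bonus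
def pvScore (pset : PySem.Set Int) (ps : List Int) (c s : Int) : Int :=
  (pvALoop ps c s).2 + (if pset.contains (pvALoop ps c s).1 then 1 else 0)

-- the record a surviving pending entry becomes after prime p
def pvTransf (p : Int) (r : Int × Int × Int) : Int × Int × Int :=
  if PySem.Int.mod r.1 p = 0 then (pvWhileDiv r.1.natAbs r.1 p, r.2.1, r.2.2 + 1) else r

-- dict after pvBMain followed by the finalisation fold
def pvFinal (pset : PySem.Set Int) (ps : List Int)
    (pending : List (Int × Int × Int)) (done : PySem.Dict Int Int) : PySem.Dict Int Int :=
  ((pvBMain pset ps pending done).1).foldl (fun d r =>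
    d.insert r.2.1 (r.2.2 + (if pset.contains r.1 then 1 else 0))) (pvBMain pset ps pending done).2

lemma pvTransf_key (p : Int) (r : Int × Int × Int) : (pvTransf p r).2.1 = r.2.1 := by
  unfold pvTransf; split_ifs <;> rfl

lemma pvScore_break (pset : PySem.Set Int) (p : Int) (ps : List Int) (c s : Int)
    (h : p * p > c) : pvScore pset (p :: ps) c s = s + (if pset.contains c then 1 else 0) := by
  unfold pvScore pvALoop; simp [h]

lemma pvScore_surv (pset : PySem.Set Int) (p : Int) (ps : List Int) (c s : Int)
    (h : ¬ p * p > c) :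
    pvScore pset (p :: ps) c s
      = pvScore pset ps (pvTransf p (c, 0, s)).1 (pvTransf p (c, 0, s)).2.2 := by
  have he : pvALoop (p :: ps) c s
      = if p * p > c then (c, s)
        else if PySem.Int.mod c p = 0 then pvALoop ps (pvWhileDiv c.natAbs c p) (s + 1)
        else pvALoop ps c s := rfl
  unfold pvScore
  rw [he]
  by_cases hd : PySem.Int.mod c p = 0 <;> simp [h, hd, pvTransf]

-- pvBPass, characterised: survivors in order, finalised records inserted into done
lemma pvBPass_go (pset : PySem.Set Int) (p : Int) (pending : List (Int × Int × Int)) :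
    ∀ (acc : List (Int × Int × Int)) (d : PySem.Dict Int Int),
    pending.foldl (fun st r =>
      if p * p > r.1 then
        (st.1, st.2.insert r.2.1 (r.2.2 + (if pset.contains r.1 then 1 else 0)))
      else if PySem.Int.mod r.1 p = 0 then
        (st.1 ++ [(pvWhileDiv r.1.natAbs r.1 p, r.2.1, r.2.2 + 1)], st.2)
      else
        (st.1 ++ [r], st.2)) (acc, d)
    = (acc ++ (pending.filter (fun r => !decide (p * p > r.1))).map (pvTransf p),
       pending.foldl (fun d r =>
         if p * p > r.1 then d.insert r.2.1 (r.2.2 + (if pset.contains r.1 then 1 else 0)) else d) d) := by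
  induction pending with
  | nil => intro acc d; simp
  | cons r rest ih =>
    intro acc d
    by_cases h1 : p * p > r.1
    · simpa [h1, List.foldl_cons] using ih acc (d.insert r.2.1 (r.2.2 + (if pset.contains r.1 then 1 else 0)))
    · by_cases h2 : PySem.Int.mod r.1 p = 0
      · simpa [h1, h2, List.foldl_cons, pvTransf] using
          ih (acc ++ [(pvWhileDiv r.1.natAbs r.1 p, r.2.1, r.2.2 + 1)]) d
      · simpa [h1, h2, List.foldl_cons, pvTransf] using ih (acc ++ [r]) d

lemma pvBPass_eq (pset : PySem.Set Int) (p : Int) (pending : List (Int × Int × Int))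
    (done : PySem.Dict Int Int) :
    pvBPass pset p pending done
    = ((pending.filter (fun r => !decide (p * p > r.1))).map (pvTransf p),
       pending.foldl (fun d r =>
         if p * p > r.1 then d.insert r.2.1 (r.2.2 + (if pset.contains r.1 then 1 else 0)) else d) done) := by
  unfold pvBPass
  simpa using pvBPass_go pset p pending [] done

-- lookups through the conditional-insert fold over records with distinct keys
lemma pvDFold_get? (pset : PySem.Set Int) (p : Int) (j : Int) :
    ∀ (pending : List (Int × Int × Int)) (d : PySem.Dict Int Int),
    (pending.map (fun r => r.2.1)).Nodup →
    (pending.foldl (fun d r =>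
        if p * p > r.1 then d.insert r.2.1 (r.2.2 + (if pset.contains r.1 then 1 else 0)) else d) d).get? j
    = match pending.find? (fun r => r.2.1 == j) with
      | some r => if p * p > r.1 then some (r.2.2 + (if pset.contains r.1 then 1 else 0)) else d.get? j
      | none => d.get? j := by
  intro pending
  induction pending with
  | nil => intro d _; simp
  | cons r rest ih =>
    intro d hnd
    have hnd' : (rest.map (fun r => r.2.1)).Nodup := (List.nodup_cons.mp hnd).2
    have hkey : r.2.1 ∉ rest.map (fun r => r.2.1) := (List.nodup_cons.mp hnd).1
    by_cases hj : r.2.1 = j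
    · -- r is THE record with key j; the rest of the fold never touches key j
      have hrest : ∀ (d' : PySem.Dict Int Int),
          (rest.foldl (fun d r =>
            if p * p > r.1 then d.insert r.2.1 (r.2.2 + (if pset.contains r.1 then 1 else 0)) else d) d').get? j
          = d'.get? j := by
        subst hj
        clear ih hnd hnd'
        induction rest with
        | nil => intro d'; simp
        | cons r' rest' ih' =>
          intro d'
          have hne : r.2.1 ≠ r'.2.1 := by
            intro hh; exact hkey (by simp [hh])
          have hkey' : r.2.1 ∉ rest'.map (fun r => r.2.1) := by
            intro hh; exact hkey (by simp; right; simpa using hh)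
          simp only [List.foldl_cons]
          rw [ih' hkey']
          by_cases h1 : p * p > r'.1
          · rw [if_pos h1]; exact PySem.Dict.get?_insert_of_ne d' _ hne
          · rw [if_neg h1]
      simp only [List.foldl_cons, List.find?_cons, hj]
      rw [hrest]
      simp only [BEq.rfl]
      by_cases h1 : p * p > r.1
      · rw [if_pos h1, if_pos h1]
        simp [PySem.Dict.get?_insert_self]
      · rw [if_neg h1, if_neg h1]
    · have hj' : (r.2.1 == j) = false := by simp [hj]
      simp only [List.foldl_cons, List.find?_cons, hj']
      rw [ih _ hnd']
      have hbase : (if p * p > r.1 then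
          d.insert r.2.1 (r.2.2 + (if pset.contains r.1 then 1 else 0)) else d).get? j = d.get? j := by
        by_cases h1 : p * p > r.1
        · rw [if_pos h1]; exact PySem.Dict.get?_insert_of_ne d _ (Ne.symm hj)
        · rw [if_neg h1]
      cases hfind : rest.find? (fun r => r.2.1 == j) with
      | none => exact hbase
      | some r' =>
        dsimp only
        by_cases h1 : p * p > r'.1
        · rw [if_pos h1, if_pos h1]
        · rw [if_neg h1, if_neg h1]; exact hbase

-- find? by key commutes with the survivor filter+map, given distinct keys
lemma pvFind_filter (p : Int) (j : Int) :
    ∀ (pending : List (Int × Int × Int)), (pending.map (fun r => r.2.1)).Nodup →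
    ((pending.filter (fun r => !decide (p * p > r.1))).map (pvTransf p)).find? (fun r => r.2.1 == j)
    = match pending.find? (fun r => r.2.1 == j) with
      | some r => if p * p > r.1 then none else some (pvTransf p r)
      | none => none := by
  intro pending
  induction pending with
  | nil => intro _; simp
  | cons r rest ih =>
    intro hnd
    have hnd' : (rest.map (fun r => r.2.1)).Nodup := (List.nodup_cons.mp hnd).2
    have hkey : r.2.1 ∉ rest.map (fun r => r.2.1) := (List.nodup_cons.mp hnd).1
    have hkeyT : ((pvTransf p r).2.1 == j) = (r.2.1 == j) := by rw [pvTransf_key]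
    by_cases hj : r.2.1 = j
    · have hbj : (r.2.1 == j) = true := by simp [hj]
      by_cases h1 : p * p > r.1
      · -- r is retired this pass; no other record carries key j
        have hq : (!decide (p * p > r.1)) = false := by simp [h1]
        have hnone : ((rest.filter (fun r => !decide (p * p > r.1))).map (pvTransf p)).find?
            (fun r => r.2.1 == j) = none := by
          apply List.find?_eq_none.mpr
          intro x hx
          obtain ⟨y, hy, rfl⟩ := List.mem_map.mp hx
          have hy' : y ∈ rest := List.mem_of_mem_filter hy
          rw [pvTransf_key]
          intro hh
          have hyj : y.2.1 = j := by simpa using hh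
          exact hkey (hj ▸ List.mem_map.mpr ⟨y, hy', hyj⟩)
        rw [List.filter_cons_of_neg (by simp [h1])]
        rw [hnone, List.find?_cons_of_pos (p := fun r : Int × Int × Int => r.2.1 == j) hbj]
        simp [h1]
      · have hq : (!decide (p * p > r.1)) = true := by simp [h1]
        rw [List.filter_cons_of_pos (by simp [h1]), List.map_cons]
        rw [List.find?_cons_of_pos (p := fun r : Int × Int × Int => r.2.1 == j) (by show ((pvTransf p r).2.1 == j) = true; rw [hkeyT]; exact hbj)]
        rw [List.find?_cons_of_pos (p := fun r : Int × Int × Int => r.2.1 == j) hbj]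
        simp [h1]
    · have hbj : (r.2.1 == j) = false := by simp [hj]
      by_cases h1 : p * p > r.1
      · rw [List.filter_cons_of_neg (by simp [h1])]
        rw [List.find?_cons_of_neg (p := fun r : Int × Int × Int => r.2.1 == j) (by simp [hj])]
        exact ih hnd'
      · rw [List.filter_cons_of_pos (by simp [h1]), List.map_cons]
        rw [List.find?_cons_of_neg (p := fun r : Int × Int × Int => r.2.1 == j) (by simp [pvTransf_key, hj])]
        rw [List.find?_cons_of_neg (p := fun r : Int × Int × Int => r.2.1 == j) (by simp [hj])]
        exact ih hnd'

lemma pvSurv_keys_nodup (p : Int) (pending : List (Int × Int × Int))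
    (hnd : (pending.map (fun r => r.2.1)).Nodup) :
    (((pending.filter (fun r => !decide (p * p > r.1))).map (pvTransf p)).map (fun r => r.2.1)).Nodup := by
  have h1 : ((pending.filter (fun r => !decide (p * p > r.1))).map (pvTransf p)).map (fun r => r.2.1)
      = (pending.filter (fun r => !decide (p * p > r.1))).map (fun r => r.2.1) := by
    rw [List.map_map]
    apply List.map_congr_left
    intro r _
    exact pvTransf_key p r
  rw [h1]
  exact hnd.sublist (List.Sublist.map _ List.filter_sublist)

-- the unconditional finalisation fold, same lookup shape
lemma pvIFold_get? (pset : PySem.Set Int) (j : Int) :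
    ∀ (pending : List (Int × Int × Int)) (d : PySem.Dict Int Int),
    (pending.map (fun r => r.2.1)).Nodup →
    (pending.foldl (fun d r =>
        d.insert r.2.1 (r.2.2 + (if pset.contains r.1 then 1 else 0))) d).get? j
    = match pending.find? (fun r => r.2.1 == j) with
      | some r => some (r.2.2 + (if pset.contains r.1 then 1 else 0))
      | none => d.get? j := by
  intro pending
  induction pending with
  | nil => intro d _; simp
  | cons r rest ih =>
    intro d hnd
    have hnd' : (rest.map (fun r => r.2.1)).Nodup := (List.nodup_cons.mp hnd).2
    have hkey : r.2.1 ∉ rest.map (fun r => r.2.1) := (List.nodup_cons.mp hnd).1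
    by_cases hj : r.2.1 = j
    · have hrest : ∀ (d' : PySem.Dict Int Int),
          (rest.foldl (fun d r =>
            d.insert r.2.1 (r.2.2 + (if pset.contains r.1 then 1 else 0))) d').get? j = d'.get? j := by
        subst hj
        clear ih hnd hnd'
        induction rest with
        | nil => intro d'; simp
        | cons r' rest' ih' =>
          intro d'
          have hne : r.2.1 ≠ r'.2.1 := by
            intro hh; exact hkey (by simp [hh])
          have hkey' : r.2.1 ∉ rest'.map (fun r => r.2.1) := by
            intro hh; exact hkey (by simp; right; simpa using hh)
          simp only [List.foldl_cons]
          rw [ih' hkey']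
          exact PySem.Dict.get?_insert_of_ne d' _ hne
      simp only [List.foldl_cons]
      rw [List.find?_cons_of_pos (p := fun r : Int × Int × Int => r.2.1 == j) (by simp [hj])]
      rw [hrest]
      simp [PySem.Dict.get?_insert_self, hj]
    · simp only [List.foldl_cons]
      rw [List.find?_cons_of_neg (p := fun r : Int × Int × Int => r.2.1 == j) (by simp [hj])]
      rw [ih _ hnd']
      cases hfind : rest.find? (fun r => r.2.1 == j) with
      | none => exact PySem.Dict.get?_insert_of_ne d _ (Ne.symm hj)
      | some r' => rfl

-- MAIN LEMMA: the final dict looks up to A's per-number score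
lemma pvFinal_get? (pset : PySem.Set Int) (j : Int) :
    ∀ (ps : List Int) (pending : List (Int × Int × Int)) (done : PySem.Dict Int Int),
    (pending.map (fun r => r.2.1)).Nodup →
    (pvFinal pset ps pending done).get? j
    = match pending.find? (fun r => r.2.1 == j) with
      | some r => some (pvScore pset ps r.1 r.2.2)
      | none => done.get? j := by
  intro ps
  induction ps with
  | nil =>
    intro pending done hnd
    unfold pvFinal pvBMain
    exact pvIFold_get? pset j pending done hnd
  | cons p ps ih =>
    intro pending done hnd
    by_cases hemp : pending.isEmpty
    · have hpe : pending = [] := List.isEmpty_iff.mp hemp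
      subst hpe
      unfold pvFinal pvBMain
      simp
    · unfold pvFinal pvBMain
      simp only [hemp, Bool.false_eq_true, if_false]
      rw [pvBPass_eq]
      have hIH := ih (((pending.filter (fun r => !decide (p * p > r.1))).map (pvTransf p)))
        (pending.foldl (fun d r =>
          if p * p > r.1 then d.insert r.2.1 (r.2.2 + (if pset.contains r.1 then 1 else 0)) else d) done)
        (pvSurv_keys_nodup p pending hnd)
      unfold pvFinal at hIH
      rw [hIH]
      rw [pvFind_filter p j pending hnd]
      rw [pvDFold_get? pset p j pending done hnd]
      cases hfind : pending.find? (fun r => r.2.1 == j) with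
      | none => rfl
      | some r =>
        dsimp only
        by_cases h1 : p * p > r.1
        · rw [if_pos h1, if_pos h1]
          dsimp only
          rw [pvScore_break pset p ps r.1 r.2.2 h1]
        · rw [if_neg h1, if_neg h1]
          dsimp only
          rw [pvScore_surv pset p ps r.1 r.2.2 h1]
          have hc : (pvTransf p (r.1, 0, r.2.2)).1 = (pvTransf p r).1 := by
            unfold pvTransf; split_ifs <;> rfl
          have hs : (pvTransf p (r.1, 0, r.2.2)).2.2 = (pvTransf p r).2.2 := by
            unfold pvTransf; split_ifs <;> rfl
          rw [hc, hs]

-- initial pending list: distinct keys, and the record for key k is (nums[k], k, 0)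
lemma pvZipIdxSnd (nums : List Int) : ∀ i : Nat,
    (nums.zipIdx i).map (fun q => (q.2 : Int)) = (List.range nums.length).map (fun k => ((k + i : Nat) : Int)) := by
  induction nums with
  | nil => intro i; simp
  | cons x xs ih =>
    intro i
    rw [List.zipIdx_cons, List.map_cons, ih (i + 1)]
    rw [List.length_cons, List.range_succ_eq_map, List.map_cons, List.map_map]
    congr 1
    · simp
    · apply List.map_congr_left
      intro k _
      simp [Function.comp]
      ring

lemma pvPending0_keys (nums : List Int) :
    ((nums.zipIdx.map (fun q => (q.1, (q.2 : Int), (0 : Int)))).map (fun r => r.2.1)).Nodup := by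
  rw [List.map_map]
  have h : ((fun r : Int × Int × Int => r.2.1) ∘ (fun q : Int × Nat => (q.1, (q.2 : Int), (0 : Int))))
      = (fun q : Int × Nat => (q.2 : Int)) := rfl
  rw [h, pvZipIdxSnd nums 0]
  apply List.Nodup.map
  · intro a b hab
    simpa using hab
  · exact List.nodup_range

lemma pvFind_of_mem {l : List (Int × Int × Int)} (hnd : (l.map (fun r => r.2.1)).Nodup)
    {r : Int × Int × Int} (hr : r ∈ l) : l.find? (fun x => x.2.1 == r.2.1) = some r := by
  induction l with
  | nil => simp at hr
  | cons a t ih =>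
    have hnd' : (t.map (fun r => r.2.1)).Nodup := (List.nodup_cons.mp hnd).2
    have hkey : a.2.1 ∉ t.map (fun r => r.2.1) := (List.nodup_cons.mp hnd).1
    rcases List.mem_cons.mp hr with rfl | hrt
    · rw [List.find?_cons_of_pos (p := fun x : Int × Int × Int => x.2.1 == r.2.1) (by simp)]
    · have hne : a.2.1 ≠ r.2.1 := by
        intro hh
        exact hkey (hh ▸ List.mem_map.mpr ⟨r, hrt, rfl⟩)
      rw [List.find?_cons_of_neg (p := fun x : Int × Int × Int => x.2.1 == r.2.1) (by simp [hne])]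
      exact ih hnd' hrt

lemma pvPending0_find (nums : List Int) (k : Nat) (hk : k < nums.length) :
    (nums.zipIdx.map (fun q => (q.1, (q.2 : Int), (0 : Int)))).find? (fun r => r.2.1 == (k : Int))
    = some (nums[k], (k : Int), 0) := by
  have hmem : (nums[k], (k : Int), (0 : Int)) ∈ nums.zipIdx.map (fun q => (q.1, (q.2 : Int), (0 : Int))) := by
    have hlen : k < (nums.zipIdx.map (fun q => (q.1, (q.2 : Int), (0 : Int)))).length := by
      simpa using hk
    have : (nums.zipIdx.map (fun q => (q.1, (q.2 : Int), (0 : Int))))[k] = (nums[k], (k : Int), (0 : Int)) := by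
      simp [List.getElem_zipIdx]
    exact this ▸ List.getElem_mem hlen
  exact pvFind_of_mem (pvPending0_keys nums) hmem

-- ===== VERDICT (by name: the statement is the Claim_ definition above) =====
theorem get_prime_scores_py_spec : Claim_equal_get_prime_scores_py := by
  intro nums primes _ _
  unfold Spec_get_prime_scores_py
  show (get_prime_scores_py nums primes) = get_prime_scores_py_alt nums primes
  have hA : get_prime_scores_py nums primes
      = nums.map (fun num => pvScore (PySem.Set.ofList primes) primes num 0) := by
    unfold get_prime_scores_py
    exact PySem.List.foldl_append_singleton_eq_map _ nums []
  rw [hA]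
  unfold get_prime_scores_py_alt
  rw [PySem.List.len_eq, PySem.List.pyRange_zero_nat, List.map_map]
  apply List.ext_getElem
  · simp
  · intro k hk1 hk2
    simp only [List.getElem_map, List.getElem_range, Function.comp]
    have hklen : k < nums.length := by simpa using hk1
    have hget := pvFinal_get? (PySem.Set.ofList primes) (k : Int) primes
      (nums.zipIdx.map (fun q => (q.1, (q.2 : Int), (0 : Int)))) PySem.Dict.empty
      (pvPending0_keys nums)
    rw [pvPending0_find nums k hklen] at hget
    show pvScore (PySem.Set.ofList primes) primes nums[k] 0 = _
    rw [PySem.Dict.getD_eq_get?_getD]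
    unfold pvFinal at hget
    rw [hget]
    rfl
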